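-- pv_equiv track=rewrite | github.com/zeppeki/project-euler-first100 | problems/lib/matrix_utils.py | find_max_product_in_grid
-- ===== SOURCE A (Python) =====
-- def find_max_product_in_grid(
--     grid: list[list[int]],
--     length: int,
--     directions: list[tuple[int, int]] | None = None,
-- ) -> int:
--     """
--     グリッド内で指定長の連続する数の最大積を探索
--
--     Args:
--         grid: 数値グリッド
--         length: 連続する数の長さ
--         directions: 探索方向 [(dr, dc), ...]
--
--     Returns:
--         最大積
--
--     時間計算量: O(m×n×d×length) where d=方向数
--     空間計算量: O(1)
--
--     Examples:
--         >>> grid = [[8, 2, 22, 97], [49, 49, 99, 40]]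
--         >>> find_max_product_in_grid(grid, 3)
--         # 連続する3つの数の最大積
--     """
--     if not grid or not grid[0] or length <= 0:
--         return 0
--
--     rows, cols = len(grid), len(grid[0])
--     max_product = 0
--
--     if directions is None:
--         # 4方向: 水平、垂直、斜め2方向
--         directions = [(0, 1), (1, 0), (1, 1), (1, -1)]
--
--     for row in range(rows):
--         for col in range(cols):
--             for dr, dc in directions:
--                 product = 1
--                 valid = True
--
--                 for i in range(length):
--                     new_row = row + i * dr
--                     new_col = col + i * dc
--
--                     # 境界チェック
--                     if not (0 <= new_row < rows and 0 <= new_col < cols):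
--                         valid = False
--                         break
--
--                     product *= grid[new_row][new_col]
--
--                 if valid:
--                     max_product = max(max_product, product)
--
--     return max_product
-- ===== SOURCE B (Python) =====
-- def find_max_product_in_grid(
--     grid: list[list[int]],
--     length: int,
--     directions: list[tuple[int, int]] | None = None,
-- ) -> int:
--     """Per-direction dynamic-programming product tables plus one max sweep."""
--     if not grid or not grid[0] or length <= 0:
--         return 0
--
--     rows, cols = len(grid), len(grid[0])
--     if directions is None:
--         directions = [(0, 1), (1, 0), (1, 1), (1, -1)]
--
--     tables = []
--     for dr, dc in directions:
--         # table[r][c] = product of the window of the current length starting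
--         # at (r, c) in direction (dr, dc), or None if it leaves the grid.
--         table = [[grid[r][c] for c in range(cols)] for r in range(rows)]
--         for _ in range(length - 1):
--             if not any(v is not None for row_t in table for v in row_t):
--                 break
--             table = [
--                 [
--                     grid[r][c] * table[r + dr][c + dc]
--                     if 0 <= r + dr < rows
--                     and 0 <= c + dc < cols
--                     and table[r + dr][c + dc] is not None
--                     else None
--                     for c in range(cols)
--                 ]
--                 for r in range(rows)
--             ]
--         tables.append(table)
--
--     best = 0
--     for r in range(rows):
--         for c in range(cols):
--             for table in tables:
--                 v = table[r][c]
--                 if v is not None: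
--                     best = max(best, v)
--     return best
-- ===== Notes on version B (the rewrite author's own statement) =====
-- stated objective: alternative
-- what changed: Replaces the per-cell/per-direction window walk (restarting the product from scratch at every cell) by per-direction dynamic-programming product tables built in length-1 grid-wide passes (with an early stop once every window has left the grid), followed by a single max sweep over the tables.
import Mathlib
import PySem

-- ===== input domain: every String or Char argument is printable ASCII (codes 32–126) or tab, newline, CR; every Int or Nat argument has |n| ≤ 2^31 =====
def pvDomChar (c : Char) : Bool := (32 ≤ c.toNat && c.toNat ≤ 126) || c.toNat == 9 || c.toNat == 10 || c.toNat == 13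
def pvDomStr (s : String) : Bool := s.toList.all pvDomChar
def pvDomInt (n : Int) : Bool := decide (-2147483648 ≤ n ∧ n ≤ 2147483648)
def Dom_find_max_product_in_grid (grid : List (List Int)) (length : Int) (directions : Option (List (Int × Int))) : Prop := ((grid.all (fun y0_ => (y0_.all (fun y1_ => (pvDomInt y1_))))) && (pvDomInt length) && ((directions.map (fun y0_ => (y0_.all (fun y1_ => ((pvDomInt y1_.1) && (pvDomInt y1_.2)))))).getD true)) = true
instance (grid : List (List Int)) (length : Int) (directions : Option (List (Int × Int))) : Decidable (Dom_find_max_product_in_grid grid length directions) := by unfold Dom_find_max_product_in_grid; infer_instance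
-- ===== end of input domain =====

-- B replaces A's per-cell/per-direction window walk by per-direction DP product
-- tables (length-1 grid-wide passes with an early stop) plus one max sweep
-- (objective: alternative, same asymptotic cost).

-- ===== PORT A =====
-- the inner 'for i in range(length)' loop: accumulates the product, breaks (valid=False)
-- on the first out-of-bounds step; grid accesses are in range whenever the guard holds
-- (Pre_ makes the rows long enough), so the pyGetD defaults are never taken there.
def pvAInner (grid : List (List Int)) (rows cols row col dr dc : Int) :
    Nat → Int → Int → Int × Bool
  | 0, _, product => (product, true)
  | n+1, i, product =>
    let new_row := row + i * dr
    let new_col := col + i * dc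
    if 0 ≤ new_row ∧ new_row < rows ∧ 0 ≤ new_col ∧ new_col < cols then
      pvAInner grid rows cols row col dr dc n (i + 1)
        (product * PySem.List.pyGetD (PySem.List.pyGetD grid new_row []) new_col 0)
    else (product, false)

def find_max_product_in_grid (grid : List (List Int)) (length : Int) (directions : Option (List (Int × Int))) : Int :=
  if grid = [] ∨ grid.headD [] = [] ∨ length ≤ 0 then 0
  else
    let rows : Int := grid.length
    let cols : Int := (grid.headD []).length
    let dirs := directions.getD [(0,1),(1,0),(1,1),(1,-1)]
    (PySem.List.pyRange 0 rows 1).foldl (fun acc row =>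
      (PySem.List.pyRange 0 cols 1).foldl (fun acc col =>
        dirs.foldl (fun acc d =>
          let res := pvAInner grid rows cols row col d.1 d.2 length.toNat 0 1
          if res.2 then max acc res.1 else acc) acc) acc) 0

-- ===== PORT B =====
-- table[r][c] = some (product of current-length window starting at (r,c)), none if it leaves the grid
def pvBTable0 (grid : List (List Int)) (cols : Nat) : List (List (Option Int)) :=
  grid.map (fun rowL => (List.range cols).map (fun c => some (rowL.getD c 0)))

def pvBStep (grid : List (List Int)) (rows cols dr dc : Int)
    (t : List (List (Option Int))) : List (List (Option Int)) :=
  (List.range rows.toNat).map (fun (r : Nat) =>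
    (List.range cols.toNat).map (fun (c : Nat) =>
      let nr : Int := (r : Int) + dr
      let nc : Int := (c : Int) + dc
      if 0 ≤ nr ∧ nr < rows ∧ 0 ≤ nc ∧ nc < cols then
        match (t.getD nr.toNat []).getD nc.toNat none with
        | some v => some (((grid.getD r []).getD c 0) * v)
        | none => none
      else none))

-- the 'for _ in range(length - 1)' loop with its all-None early break
def pvBIter (grid : List (List Int)) (rows cols dr dc : Int) :
    Nat → List (List (Option Int)) → List (List (Option Int))
  | 0, t => t
  | n+1, t =>
    if t.all (fun rowT => rowT.all (fun v => v.isNone)) then t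
    else pvBIter grid rows cols dr dc n (pvBStep grid rows cols dr dc t)

def find_max_product_in_grid_alt (grid : List (List Int)) (length : Int) (directions : Option (List (Int × Int))) : Int :=
  if grid = [] ∨ grid.headD [] = [] ∨ length ≤ 0 then 0
  else
    let rows : Int := grid.length
    let cols : Int := (grid.headD []).length
    let dirs := directions.getD [(0,1),(1,0),(1,1),(1,-1)]
    let tables := dirs.map (fun d =>
      pvBIter grid rows cols d.1 d.2 (length - 1).toNat (pvBTable0 grid cols.toNat))
    (List.range rows.toNat).foldl (fun acc r =>
      (List.range cols.toNat).foldl (fun acc c =>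
        tables.foldl (fun acc t =>
          match (t.getD r []).getD c none with
          | some v => max acc v
          | none => acc) acc) acc) 0

-- ===== PRECONDITION & SPEC =====
-- Pre_ excludes exactly the inputs where Python A raises IndexError: a grid whose
-- first row is nonempty but some later row is shorter than it, reached with a
-- positive length and a nonempty (or defaulted) direction list.
def Pre_find_max_product_in_grid (grid : List (List Int)) (length : Int) (directions : Option (List (Int × Int))) : Prop :=
  grid ≠ [] → grid.headD [] ≠ [] → 1 ≤ length → directions ≠ some [] →
    ∀ r ∈ grid, (grid.headD []).length ≤ r.length
instance (grid : List (List Int)) (length : Int) (directions : Option (List (Int × Int))) : Decidable (Pre_find_max_product_in_grid grid length directions) := by unfold Pre_find_max_product_in_grid; infer_instance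

def pvWitness_find_max_product_in_grid : List (List Int) × Int × (Option (List (Int × Int))) :=
  ([[8, 2, 22, 97], [49, 49, 99, 40]], 3, none)

def Spec_find_max_product_in_grid (grid : List (List Int)) (length : Int) (directions : Option (List (Int × Int))) (out : Int) : Prop := out = find_max_product_in_grid_alt grid length directions
instance (grid : List (List Int)) (length : Int) (directions : Option (List (Int × Int))) (out : Int) : Decidable (Spec_find_max_product_in_grid grid length directions out) := by unfold Spec_find_max_product_in_grid; infer_instance

-- ===== CLAIM (what is proved, stated in full; the proofs are below) =====
def Claim_equal_find_max_product_in_grid : Prop := ∀ (grid : List (List Int)) (length : Int) (directions : Option (List (Int × Int))), Dom_find_max_product_in_grid grid length directions → Pre_find_max_product_in_grid grid length directions → Spec_find_max_product_in_grid grid length directions (find_max_product_in_grid grid length directions)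

-- ===== LEMMAS AND PROOFS =====

-- the value of the length-k window starting at (r, c) in direction (dr, dc):
-- some (product of its cells) if all k cells are in bounds, none otherwise
def pvWin (grid : List (List Int)) (rows cols dr dc : Int) : Nat → Int → Int → Option Int
  | 0, _, _ => some 1
  | k+1, r, c =>
    if 0 ≤ r ∧ r < rows ∧ 0 ≤ c ∧ c < cols then
      (pvWin grid rows cols dr dc k (r + dr) (c + dc)).map
        (fun v => (grid.getD r.toNat []).getD c.toNat 0 * v)
    else none

theorem pvWin_none_of_oob (grid : List (List Int)) (rows cols dr dc r c : Int) (k : Nat)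
    (hk : 1 ≤ k) (h : ¬ (0 ≤ r ∧ r < rows ∧ 0 ≤ c ∧ c < cols)) :
    pvWin grid rows cols dr dc k r c = none := by
  cases k with
  | zero => omega
  | succ m => simp [pvWin, h]

-- bridge: pyGetD at a nonnegative in-range index is plain getD
theorem pvGet_bridge (grid : List (List Int)) (r c : Int) (hr : 0 ≤ r) (hc : 0 ≤ c) :
    PySem.List.pyGetD (PySem.List.pyGetD grid r []) c 0 = (grid.getD r.toNat []).getD c.toNat 0 := by
  rw [PySem.List.pyGetD_of_nonneg _ _ hr, PySem.List.pyGetD_of_nonneg _ _ hc]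

theorem pvAInner_some (grid : List (List Int)) (rows cols row col dr dc : Int) (k : Nat) :
    ∀ (i product v : Int),
      pvWin grid rows cols dr dc k (row + i * dr) (col + i * dc) = some v →
      pvAInner grid rows cols row col dr dc k i product = (product * v, true) := by
  induction k with
  | zero => intro i product v h; simp [pvWin] at h; simp [pvAInner, ← h]
  | succ n ih =>
    intro i product v h
    simp only [pvWin] at h
    by_cases hb : 0 ≤ row + i * dr ∧ row + i * dr < rows ∧ 0 ≤ col + i * dc ∧ col + i * dc < cols
    · rw [if_pos hb] at h
      simp only [Option.map_eq_some_iff] at h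
      obtain ⟨w, hw, hv⟩ := h
      simp only [pvAInner, if_pos hb]
      have harg : row + i * dr + dr = row + (i + 1) * dr := by ring
      have harg2 : col + i * dc + dc = col + (i + 1) * dc := by ring
      rw [harg, harg2] at hw
      rw [ih (i+1) _ w hw, pvGet_bridge _ _ _ hb.1 hb.2.2.1]
      simp only [Prod.mk.injEq]
      exact ⟨by rw [← hv]; ring, trivial⟩
    · rw [if_neg hb] at h; exact absurd h (by simp)

theorem pvAInner_none (grid : List (List Int)) (rows cols row col dr dc : Int) (k : Nat) :
    ∀ (i product : Int),
      pvWin grid rows cols dr dc k (row + i * dr) (col + i * dc) = none →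
      (pvAInner grid rows cols row col dr dc k i product).2 = false := by
  induction k with
  | zero => intro i product h; simp [pvWin] at h
  | succ n ih =>
    intro i product h
    simp only [pvWin] at h
    by_cases hb : 0 ≤ row + i * dr ∧ row + i * dr < rows ∧ 0 ≤ col + i * dc ∧ col + i * dc < cols
    · rw [if_pos hb, Option.map_eq_none_iff] at h
      have harg : row + i * dr + dr = row + (i + 1) * dr := by ring
      have harg2 : col + i * dc + dc = col + (i + 1) * dc := by ring
      rw [harg, harg2] at h
      simp only [pvAInner, if_pos hb]
      exact ih (i+1) _ h
    · simp [pvAInner, if_neg hb]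

def pvTableOf (grid : List (List Int)) (rows cols dr dc : Int) (k : Nat) : List (List (Option Int)) :=
  (List.range rows.toNat).map (fun (r : Nat) =>
    (List.range cols.toNat).map (fun (c : Nat) => pvWin grid rows cols dr dc k (r : Int) (c : Int)))

-- lookup in pvTableOf at in-range indices
theorem pvTableOf_getD (grid : List (List Int)) (rows cols dr dc : Int) (k : Nat)
    (r c : Nat) (hr : r < rows.toNat) (hc : c < cols.toNat) :
    ((pvTableOf grid rows cols dr dc k).getD r []).getD c none
      = pvWin grid rows cols dr dc k (r : Int) (c : Int) := by
  rw [pvTableOf, PySem.List.getD_map_range _ _ _ _ hr, PySem.List.getD_map_range _ _ _ _ hc]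

theorem pvBTable0_eq (grid : List (List Int)) (cols dr dc : Int) (hc : 0 ≤ cols) :
    pvBTable0 grid cols.toNat = pvTableOf grid (grid.length : Int) cols dr dc 1 := by
  apply List.ext_getElem
  · simp [pvBTable0, pvTableOf]
  · intro r h1 h2
    simp only [pvBTable0, pvTableOf, List.getElem_map, List.getElem_range]
    have hr : r < grid.length := by simpa [pvBTable0] using h1
    apply List.map_congr_left
    intro c hcm
    have hcc : c < cols.toNat := List.mem_range.mp hcm
    have hb : (0:Int) ≤ (r:Int) ∧ (r:Int) < (grid.length : Int) ∧ (0:Int) ≤ (c:Int) ∧ (c:Int) < cols := by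
      refine ⟨by positivity, by exact_mod_cast hr, by positivity, by omega⟩
    simp [pvWin, hb, List.getD_eq_getElem?_getD, hr]

theorem pvBStep_eq (grid : List (List Int)) (rows cols dr dc : Int) (k : Nat) (hk : 1 ≤ k) :
    pvBStep grid rows cols dr dc (pvTableOf grid rows cols dr dc k)
      = pvTableOf grid rows cols dr dc (k + 1) := by
  unfold pvBStep
  conv_rhs => rw [pvTableOf]
  apply List.map_congr_left
  intro r hrm
  have hr : r < rows.toNat := List.mem_range.mp hrm
  apply List.map_congr_left
  intro c hcm
  have hc : c < cols.toNat := List.mem_range.mp hcm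
  have hb : (0:Int) ≤ (r:Int) ∧ (r:Int) < rows ∧ (0:Int) ≤ (c:Int) ∧ (c:Int) < cols := by
    constructor; · positivity
    constructor; · omega
    constructor; · positivity
    · omega
  simp only []
  rw [show pvWin grid rows cols dr dc (k+1) (r:Int) (c:Int)
      = (pvWin grid rows cols dr dc k ((r:Int) + dr) ((c:Int) + dc)).map
          (fun v => (grid.getD ((r:Int)).toNat []).getD ((c:Int)).toNat 0 * v) by
    simp [pvWin, hb]]
  by_cases hnb : 0 ≤ (r:Int) + dr ∧ (r:Int) + dr < rows ∧ 0 ≤ (c:Int) + dc ∧ (c:Int) + dc < cols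
  · rw [if_pos hnb]
    have h1 : ((r:Int) + dr).toNat < rows.toNat := by omega
    have h2 : ((c:Int) + dc).toNat < cols.toNat := by omega
    rw [pvTableOf_getD grid rows cols dr dc k _ _ h1 h2]
    have e1 : ((((r:Int) + dr).toNat : Int)) = (r:Int) + dr := by omega
    have e2 : ((((c:Int) + dc).toNat : Int)) = (c:Int) + dc := by omega
    rw [e1, e2]
    cases pvWin grid rows cols dr dc k ((r:Int) + dr) ((c:Int) + dc) with
    | none => simp
    | some v => simp
  · rw [if_neg hnb]
    rw [pvWin_none_of_oob grid rows cols dr dc _ _ k hk hnb]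
    simp

theorem pvWin_none_mono (grid : List (List Int)) (rows cols dr dc : Int) (k : Nat) (hk : 1 ≤ k)
    (h : ∀ r c : Int, 0 ≤ r → r < rows → 0 ≤ c → c < cols → pvWin grid rows cols dr dc k r c = none) :
    ∀ (j : Nat) (r c : Int), 0 ≤ r → r < rows → 0 ≤ c → c < cols →
      pvWin grid rows cols dr dc (k + j) r c = none := by
  intro j
  induction j with
  | zero => exact h
  | succ m ih =>
    intro r c h1 h2 h3 h4
    have hksm : k + (m + 1) = (k + m) + 1 := by omega
    rw [hksm]
    by_cases hnb : 0 ≤ r + dr ∧ r + dr < rows ∧ 0 ≤ c + dc ∧ c + dc < cols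
    · have := ih _ _ hnb.1 hnb.2.1 hnb.2.2.1 hnb.2.2.2
      simp [pvWin, h1, h2, h3, h4, this]
    · have := pvWin_none_of_oob grid rows cols dr dc (r+dr) (c+dc) (k+m) (by omega) hnb
      simp [pvWin, h1, h2, h3, h4, this]

-- the all-None test on pvTableOf reads off pvWin being none on all in-range cells
theorem pvTableOf_allNone (grid : List (List Int)) (rows cols dr dc : Int) (k : Nat) :
    ((pvTableOf grid rows cols dr dc k).all (fun rowT => rowT.all (fun v => v.isNone)) = true)
      ↔ ∀ r c : Nat, r < rows.toNat → c < cols.toNat →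
          pvWin grid rows cols dr dc k (r : Int) (c : Int) = none := by
  simp [pvTableOf, List.all_eq_true, Option.isNone_iff_eq_none]
  constructor
  · intro h r c hr hc; exact h r hr c hc
  · intro h r hr c hc; exact h r c hr hc

theorem pvBIter_eq (grid : List (List Int)) (rows cols dr dc : Int) :
    ∀ (n k : Nat), 1 ≤ k →
      pvBIter grid rows cols dr dc n (pvTableOf grid rows cols dr dc k)
        = pvTableOf grid rows cols dr dc (k + n) := by
  intro n
  induction n with
  | zero => intro k hk; rfl
  | succ m ih =>
    intro k hk
    simp only [pvBIter]
    by_cases hall : (pvTableOf grid rows cols dr dc k).all (fun rowT => rowT.all (fun v => v.isNone)) = true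
    · rw [if_pos hall]
      have hnone := (pvTableOf_allNone grid rows cols dr dc k).mp hall
      have hInt : ∀ r c : Int, 0 ≤ r → r < rows → 0 ≤ c → c < cols →
          pvWin grid rows cols dr dc k r c = none := by
        intro r c h1 h2 h3 h4
        have := hnone r.toNat c.toNat (by omega) (by omega)
        rwa [Int.toNat_of_nonneg h1, Int.toNat_of_nonneg h3] at this
      unfold pvTableOf
      apply List.map_congr_left
      intro r hrm
      apply List.map_congr_left
      intro c hcm
      have hr := List.mem_range.mp hrm
      have hc := List.mem_range.mp hcm
      rw [hnone r c hr hc,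
        pvWin_none_mono grid rows cols dr dc k hk hInt (m+1) (r:Int) (c:Int)
          (by positivity) (by omega) (by positivity) (by omega)]
    · rw [if_neg hall, pvBStep_eq grid rows cols dr dc k hk, ih (k+1) (by omega)]
      congr 1
      omega


-- ===== VERDICT (by name: the statement is the Claim_ definition above) =====
theorem find_max_product_in_grid_spec : Claim_equal_find_max_product_in_grid := by
  intro grid length directions _hDom _hPre
  unfold Spec_find_max_product_in_grid
  by_cases hg : grid = [] ∨ grid.headD [] = [] ∨ length ≤ 0
  · simp only [find_max_product_in_grid, find_max_product_in_grid_alt, if_pos hg]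
  · simp only [find_max_product_in_grid, find_max_product_in_grid_alt, if_neg hg]
    have hlen : 1 ≤ length := by
      have : ¬ length ≤ 0 := fun h => hg (Or.inr (Or.inr h))
      omega
    have htab : ∀ d : Int × Int,
        pvBIter grid (grid.length : Int) ((grid.headD []).length : Int) d.1 d.2
            (length - 1).toNat (pvBTable0 grid ((grid.headD []).length : Int).toNat)
          = pvTableOf grid (grid.length : Int) ((grid.headD []).length : Int) d.1 d.2 length.toNat := by
      intro d
      rw [pvBTable0_eq grid _ d.1 d.2 (by positivity),
        pvBIter_eq grid (grid.length : Int) _ d.1 d.2 _ 1 le_rfl]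
      congr 1
      omega
    rw [PySem.List.pyRange_one, PySem.List.pyRange_one]
    simp only [List.foldl_map, sub_zero]
    apply PySem.List.foldl_congr_mem
    intro acc r hrm
    have hr : r < ((grid.length : Int)).toNat := List.mem_range.mp hrm
    apply PySem.List.foldl_congr_mem
    intro acc2 c hcm
    have hc : c < (((grid.headD []).length : Int)).toNat := List.mem_range.mp hcm
    apply PySem.List.foldl_congr_mem
    intro acc3 d hdm
    rw [htab d, pvTableOf_getD _ _ _ _ _ _ _ _ hr hc]
    cases hwin : pvWin grid (grid.length : Int) ((grid.headD []).length : Int) d.1 d.2 length.toNat (r : Int) (c : Int) with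
    | some v =>
      have hwin' : pvWin grid (grid.length : Int) ((grid.headD []).length : Int) d.1 d.2 length.toNat
          ((0 : Int) + r + 0 * d.1) ((0 : Int) + c + 0 * d.2) = some v := by
        rw [show ((0 : Int) + r + 0 * d.1) = (r : Int) by ring,
          show ((0 : Int) + c + 0 * d.2) = (c : Int) by ring]
        exact hwin
      rw [pvAInner_some grid _ _ (0 + (r : Int)) (0 + (c : Int)) d.1 d.2 length.toNat 0 1 v hwin']
      simp
    | none =>
      have hwin' : pvWin grid (grid.length : Int) ((grid.headD []).length : Int) d.1 d.2 length.toNat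
          ((0 : Int) + r + 0 * d.1) ((0 : Int) + c + 0 * d.2) = none := by
        rw [show ((0 : Int) + r + 0 * d.1) = (r : Int) by ring,
          show ((0 : Int) + c + 0 * d.2) = (c : Int) by ring]
        exact hwin
      rw [pvAInner_none grid _ _ (0 + (r : Int)) (0 + (c : Int)) d.1 d.2 length.toNat 0 1 hwin']
      simp
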